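-- pv_equiv track=rewrite | github.com/raphael-group/lazac-copy-number | scripts/WeightedCopyNumberDistanceFunctions.py | calc_Q
-- ===== SOURCE A (Python) =====
-- def calc_Q(u,v):
--     n=len(u)
--     u_m = 0
--     prev = -1
--     Q = {}
--     for i in range(n):
--         if v[i]==0:
--             u_m = max(u_m,u[i])
--         else:
--             Q[i] = (u_m,prev)
--             prev = i
--             u_m = 0
--     Q[n] = (u_m,prev)
--     return Q
-- ===== SOURCE B (Python) =====
-- def calc_Q(u, v):
--     n = len(u)
--     positions = [i for i in range(n) if v[i] != 0]
--     prev = -1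
--     Q = {}
--     for p in positions + [n]:
--         Q[p] = (max([0] + [u[j] for j in range(prev + 1, p)]), prev)
--         prev = p
--     return Q
-- ===== Notes on version B (the rewrite author's own statement) =====
-- stated objective: alternative
-- what changed: B first builds the index of nonzero positions of v, then emits each dict entry by taking the max of u over the whole zero-gap slice between consecutive breakpoints, replacing A's single incremental pass that threads a running max through every index.
import Mathlib
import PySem

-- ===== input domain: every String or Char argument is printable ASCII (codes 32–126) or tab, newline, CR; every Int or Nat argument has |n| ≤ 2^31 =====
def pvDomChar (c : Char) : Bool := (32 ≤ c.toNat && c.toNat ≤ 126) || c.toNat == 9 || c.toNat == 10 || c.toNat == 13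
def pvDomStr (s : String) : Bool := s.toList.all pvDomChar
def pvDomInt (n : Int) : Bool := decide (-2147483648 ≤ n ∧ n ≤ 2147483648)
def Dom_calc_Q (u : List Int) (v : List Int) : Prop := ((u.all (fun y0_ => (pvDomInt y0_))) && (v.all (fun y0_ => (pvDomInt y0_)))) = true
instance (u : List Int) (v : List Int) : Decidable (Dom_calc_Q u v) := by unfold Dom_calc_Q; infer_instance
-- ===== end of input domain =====

-- B builds the nonzero-position index of v first and then fills Q segment by segment
-- (max of u over each zero-gap slice), instead of A's single incremental accumulating pass.

-- ===== PORT A =====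
def stepA (u v : List Int) (st : Int × Int × PySem.Dict Int (Int × Int)) (i : Int) :
    Int × Int × PySem.Dict Int (Int × Int) :=
  if PySem.List.pyGetD v i 0 = 0 then
    (max st.1 (PySem.List.pyGetD u i 0), st.2.1, st.2.2)
  else
    (0, i, st.2.2.insert i (st.1, st.2.1))

def calc_Q (u : List Int) (v : List Int) : List (Int × Int × Int) :=
  let n : Int := u.length
  let r := (PySem.List.pyRange 0 n 1).foldl (stepA u v) (0, -1, PySem.Dict.empty)
  (r.2.2.insert n (r.1, r.2.1)).items

-- ===== PORT B =====
-- max([0] + [u[j] for j in range(a, b)])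
def gapMax (u : List Int) (a b : Int) : Int :=
  ((PySem.List.pyRange a b 1).map (fun j => PySem.List.pyGetD u j 0)).foldl max 0

def stepB (u : List Int) (st : Int × PySem.Dict Int (Int × Int)) (p : Int) :
    Int × PySem.Dict Int (Int × Int) :=
  (p, st.2.insert p (gapMax u (st.1 + 1) p, st.1))

def calc_Q_alt (u : List Int) (v : List Int) : List (Int × Int × Int) :=
  let n : Int := u.length
  let positions := (PySem.List.pyRange 0 n 1).filter (fun i => PySem.List.pyGetD v i 0 ≠ 0)
  ((positions ++ [n]).foldl (stepB u) (-1, PySem.Dict.empty)).2.items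

-- ===== PRECONDITION & SPEC =====
-- Pre excludes exactly the inputs where Python A raises IndexError (v shorter than u).
def Pre_calc_Q (u : List Int) (v : List Int) : Prop := u.length ≤ v.length
instance (u : List Int) (v : List Int) : Decidable (Pre_calc_Q u v) := by unfold Pre_calc_Q; infer_instance
def pvWitness_calc_Q : List Int × List Int := ([3, 1, 4], [0, 2, 0])

def Spec_calc_Q (u : List Int) (v : List Int) (out : List (Int × Int × Int)) : Prop := out = calc_Q_alt u v
instance (u : List Int) (v : List Int) (out : List (Int × Int × Int)) : Decidable (Spec_calc_Q u v out) := by unfold Spec_calc_Q; infer_instance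

-- ===== CLAIM (what is proved, stated in full; the proofs are below) =====
def Claim_equal_calc_Q : Prop := ∀ (u : List Int) (v : List Int), Dom_calc_Q u v → Pre_calc_Q u v → Spec_calc_Q u v (calc_Q u v)

-- ===== LEMMAS AND PROOFS =====

theorem gapMax_empty (u : List Int) (a b : Int) (h : b ≤ a) : gapMax u a b = 0 := by
  simp [gapMax, PySem.List.pyRange_one_eq_nil h]

theorem gapMax_succ (u : List Int) (a b : Int) (h : a ≤ b) :
    gapMax u a (b + 1) = max (gapMax u a b) (PySem.List.pyGetD u b 0) := by
  simp [gapMax, PySem.List.pyRange_one_succ_right h]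

-- A's loop from index s with running max m = gapMax (prev+1) s agrees with B's
-- segment pass over the remaining nonzero positions (plus the trailing sentinel n).
theorem loop_eq (u v : List Int) (n : Int) :
    ∀ (k : Nat) (s prev m : Int) (Q : PySem.Dict Int (Int × Int)),
      s ≤ n → (n - s).toNat ≤ k → prev < s → m = gapMax u (prev + 1) s →
      (let r := (PySem.List.pyRange s n 1).foldl (stepA u v) (m, prev, Q)
       r.2.2.insert n (r.1, r.2.1))
      = (((PySem.List.pyRange s n 1).filter (fun i => PySem.List.pyGetD v i 0 ≠ 0) ++ [n]).foldl
          (stepB u) (prev, Q)).2 := by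
  intro k
  induction k with
  | zero =>
    intro s prev m Q hsn hk hprev hm
    have hs : s = n := by omega
    subst hs
    simp [PySem.List.pyRange_one_eq_nil le_rfl, stepB, hm]
  | succ k ih =>
    intro s prev m Q hsn hk hprev hm
    rcases eq_or_lt_of_le hsn with hs | hs
    · subst hs
      simp [PySem.List.pyRange_one_eq_nil le_rfl, stepB, hm]
    · rw [PySem.List.pyRange_one_cons hs]
      by_cases hv : PySem.List.pyGetD v s 0 = 0
      · have h1 : stepA u v (m, prev, Q) s = (max m (PySem.List.pyGetD u s 0), prev, Q) := by
          simp [stepA, hv]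
        rw [List.foldl_cons, h1, List.filter_cons_of_neg (by simp [hv])]
        exact ih (s + 1) prev (max m (PySem.List.pyGetD u s 0)) Q (by omega) (by omega)
          (by omega) (by rw [hm, gapMax_succ u (prev + 1) s (by omega)])
      · have h1 : stepA u v (m, prev, Q) s = (0, s, Q.insert s (m, prev)) := by
          simp [stepA, hv]
        rw [List.foldl_cons, h1, List.filter_cons_of_pos (by simp [hv]), List.cons_append,
          List.foldl_cons]
        have h2 : stepB u (prev, Q) s = (s, Q.insert s (m, prev)) := by
          simp [stepB, hm]
        rw [h2]
        exact ih (s + 1) s 0 (Q.insert s (m, prev)) (by omega) (by omega) (by omega)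
          (by rw [gapMax_empty u (s + 1) (s + 1) le_rfl])

theorem calc_Q_spec : Claim_equal_calc_Q := by
  intro u v _ _
  unfold Spec_calc_Q calc_Q calc_Q_alt
  have h := loop_eq u v (u.length) (u.length) 0 (-1) 0 PySem.Dict.empty
    (by exact_mod_cast Int.natCast_nonneg u.length) (by omega) (by omega)
    (by rw [show (-1:Int) + 1 = 0 by ring, gapMax_empty u 0 0 le_rfl])
  simp only at h ⊢
  rw [h]
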